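-- pv_equiv track=rewrite | github.com/colasama/SplitTypingPlugin | main.py | merge_segments
-- ===== SOURCE A (Python) =====
-- def merge_segments(segments: list, max_segments: int = 5) -> list:
--     """合并片段为指定数量，优先合并小于3个字符的片段，保持顺序不变"""
--     if len(segments) <= max_segments:
--         return segments
--
--     # 创建副本避免修改原列表
--     merged = segments.copy()
--
--     # 循环合并，直到片段数量不超过max_segments
--     while len(merged) > max_segments:
--         # 找到小于3个字符的片段
--         short_segments = [(i, seg) for i, seg in enumerate(merged) if len(seg) < 3]
--
--         if short_segments:
--             # 优先合并小于3个字符的片段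
--             merge_idx, _ = short_segments[0]
--         else:
--             # 如果没有小于3个字符的片段，合并最短的片段
--             merge_idx = min(range(len(merged)), key=lambda i: len(merged[i]))
--
--         # 确定合并方向（优先向前合并，如果是最开始则向后合并）
--         if merge_idx == 0:
--             # 第一个片段，向后合并
--             target_idx = 1
--         elif merge_idx == len(merged) - 1:
--             # 最后一个片段，向前合并
--             target_idx = merge_idx - 1
--         else:
--             # 中间的片段，向前合并
--             target_idx = merge_idx - 1
--
--         # 执行合并，保持顺序
--         if merge_idx < target_idx:
--             # 向前合并：将当前片段合并到前一个片段
--             merged[target_idx] = merged[merge_idx] + merged[target_idx]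
--             merged.pop(merge_idx)
--         else:
--             # 向后合并：将当前片段合并到后一个片段
--             merged[target_idx] = merged[target_idx] + merged[merge_idx]
--             merged.pop(merge_idx)
--
--     return merged
-- ===== SOURCE B (Python) =====
-- def merge_segments(segments: list, max_segments: int = 5) -> list:
--     """Same merging, two phases: a single amortized stack pass handles all
--     short-segment (<3 chars) merges; a plain shortest-first loop does the rest."""
--     m = len(segments) - max_segments
--     if m <= 0:
--         return segments
--
--     # Phase 1: left-to-right stack pass; a short segment on top (or a short
--     # lone bottom once a second element arrives) is merged into its neighbour.
--     stack = []
--     for seg in segments: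
--         stack.append(seg)
--         while m > 0 and len(stack) >= 2 and (
--             len(stack[-1]) < 3 or (len(stack) == 2 and len(stack[0]) < 3)
--         ):
--             t = stack.pop()
--             s = stack.pop()
--             stack.append(s + t)
--             m -= 1
--
--     # Phase 2: no short segments remain; merge the (first) shortest into its
--     # left neighbour (or right neighbour when it is the first segment).
--     while m > 0:
--         i = min(range(len(stack)), key=lambda j: len(stack[j]))
--         j = 1 if i == 0 else i
--         stack[j - 1:j + 1] = [stack[j - 1] + stack[j]]
--         m -= 1
--
--     return stack
-- ===== Notes on version B (the rewrite author's own statement) =====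
-- stated objective: alternative
-- what changed: A rescans the whole list every iteration (rebuilding the short-segment list or the argmin) and pops in place; B does all short-segment merges in one amortized left-to-right stack pass and only then runs a shortest-first merge loop on the residue.
import Mathlib
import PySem

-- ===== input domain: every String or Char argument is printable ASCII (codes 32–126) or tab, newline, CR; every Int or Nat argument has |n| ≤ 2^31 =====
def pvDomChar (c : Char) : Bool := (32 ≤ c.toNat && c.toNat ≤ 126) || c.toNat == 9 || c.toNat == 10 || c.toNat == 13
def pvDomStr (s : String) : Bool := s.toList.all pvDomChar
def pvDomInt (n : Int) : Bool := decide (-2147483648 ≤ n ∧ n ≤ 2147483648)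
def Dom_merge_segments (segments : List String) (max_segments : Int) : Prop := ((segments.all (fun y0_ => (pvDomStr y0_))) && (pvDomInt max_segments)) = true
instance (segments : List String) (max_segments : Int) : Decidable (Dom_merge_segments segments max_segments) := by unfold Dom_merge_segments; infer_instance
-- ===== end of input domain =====

-- B replaces A's whole-list rescans by a single amortized stack pass for the short-segment
-- merges plus a shortest-first merge loop for whatever is still left over.

-- ===== PORT A =====
-- min(range(len(l)), key=lambda i: len(l[i])) — first index of minimal length;
-- Python raises ValueError on an empty list (outside Pre_), the port returns 0 there.
def pyArgmin (l : List String) : Int :=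
  (PySem.List.min? (PySem.List.pyRange 0 (PySem.List.len l) 1)
      (fun i => PySem.Str.len (PySem.List.pyGetD l i ""))).getD 0

-- the while-loop of A; fuel = initial length bounds the number of merges inside Pre_
def mergeLoopA : Nat → List String → Int → List String
  | 0, merged, _ => merged
  | fuel+1, merged, mx =>
    if PySem.List.len merged > mx then
      let short_segments := (PySem.List.enumerate merged).filter
        (fun p => decide (PySem.Str.len p.2 < 3))
      let merge_idx : Int :=
        match short_segments with
        | p :: _ => p.1
        | [] => pyArgmin merged
      let target_idx : Int :=
        if merge_idx = 0 then 1
        else if merge_idx = PySem.List.len merged - 1 then merge_idx - 1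
        else merge_idx - 1
      let merged1 : List String :=
        if merge_idx < target_idx then
          PySem.List.pySetD merged target_idx
            (PySem.List.pyGetD merged merge_idx "" ++ PySem.List.pyGetD merged target_idx "")
        else
          PySem.List.pySetD merged target_idx
            (PySem.List.pyGetD merged target_idx "" ++ PySem.List.pyGetD merged merge_idx "")
      match PySem.List.pop? merged1 merge_idx with
      | some (_, merged2) => mergeLoopA fuel merged2 mx
      | none => merged1   -- IndexError (outside Pre_)
    else merged

def merge_segments (segments : List String) (max_segments : Int) : List String :=
  if PySem.List.len segments ≤ max_segments then segments
  else mergeLoopA segments.length segments max_segments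

-- ===== PORT B =====
-- inner while of the stack pass; the stack is kept TOP-FIRST (Python's stack reversed):
-- head = stack[-1], and len(stack) == 2 ⟺ the list below the top two is [].
def reduceB : Nat → List String → Nat × List String
  | m+1, t :: s :: r =>
    if PySem.Str.len t < 3 || (decide (r = []) && decide (PySem.Str.len s < 3)) then
      reduceB m ((s ++ t) :: r)
    else (m+1, t :: s :: r)
  | m, stack => (m, stack)

-- phase 2: while m > 0, merge the first shortest segment into its neighbour
def phase2B : Nat → List String → List String
  | 0, stack => stack
  | m+1, stack =>
    let i : Int := pyArgmin stack
    let j : Int := if i = 0 then 1 else i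
    phase2B m (PySem.List.slice stack none (some (j - 1)) ++
      (PySem.List.pyGetD stack (j - 1) "" ++ PySem.List.pyGetD stack j "") ::
      PySem.List.slice stack (some (j + 1)) none)

def merge_segments_alt (segments : List String) (max_segments : Int) : List String :=
  let m : Int := PySem.List.len segments - max_segments
  if m ≤ 0 then segments
  else
    let pr := segments.foldl (fun (st : Nat × List String) seg => reduceB st.1 (seg :: st.2))
      (m.toNat, [])
    phase2B pr.1 pr.2.reverse

-- ===== PRECONDITION & SPEC =====
-- Pre_ excludes exactly the inputs where A raises: with max_segments < 1 and more
-- segments than max_segments, A eventually shrinks the list to one segment and then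
-- raises (IndexError, or ValueError on an empty list).
def Pre_merge_segments (segments : List String) (max_segments : Int) : Prop :=
  1 ≤ max_segments ∨ (segments.length : Int) ≤ max_segments
instance (segments : List String) (max_segments : Int) : Decidable (Pre_merge_segments segments max_segments) := by unfold Pre_merge_segments; infer_instance

def pvWitness_merge_segments : List String × Int := (["ab", "cd", "ef"], 1)

def Spec_merge_segments (segments : List String) (max_segments : Int) (out : List String) : Prop := out = merge_segments_alt segments max_segments
instance (segments : List String) (max_segments : Int) (out : List String) : Decidable (Spec_merge_segments segments max_segments out) := by unfold Spec_merge_segments; infer_instance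

-- ===== CLAIM (what is proved, stated in full; the proofs are below) =====
def Claim_equal_merge_segments : Prop := ∀ (segments : List String) (max_segments : Int), Dom_merge_segments segments max_segments → Pre_merge_segments segments max_segments → Spec_merge_segments segments max_segments (merge_segments segments max_segments)

-- ===== LEMMAS AND PROOFS =====

-- a segment is "short" when its Python length is < 3
def shortB (s : String) : Bool := decide (PySem.Str.len s < 3)

-- merge the adjacent pair (j, j+1), keeping order
def mergeL (l : List String) (j : Nat) : List String :=
  l.take j ++ (l.getD j "" ++ l.getD (j+1) "") :: l.drop (j+2)

-- the index A picks: first short segment, else first shortest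
def idxA (l : List String) : Nat :=
  match l.findIdx? shortB with
  | some i => i
  | none => (pyArgmin l).toNat

-- one iteration of A's while loop
def stepA (l : List String) : List String :=
  mergeL l (if idxA l = 0 then 0 else idxA l - 1)

-- iterate stepA
def refA : Nat → List String → List String
  | 0, l => l
  | m+1, l => refA m (stepA l)

-- iterate stepA while a short segment exists (and ≥ 2 segments remain)
def P : Nat → List String → Nat × List String
  | 0, l => (0, l)
  | m+1, l =>
    if (l.findIdx? shortB).isSome ∧ 2 ≤ l.length then P m (stepA l) else (m+1, l)

theorem mergeL_cons (x : String) (u : List String) (j : Nat) :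
    mergeL (x :: u) (j+1) = x :: mergeL u j := by
  simp [mergeL]

theorem mergeL_append (q u : List String) (j : Nat) :
    mergeL (q ++ u) (q.length + j) = q ++ mergeL u j := by
  induction q with
  | nil => simp
  | cons x q ih =>
    have : (x :: q).length + j = (q.length + j) + 1 := by simp; omega
    rw [this, List.cons_append, mergeL_cons, ih]; simp

theorem mergeL_zero_cons (s t : String) (rest : List String) :
    mergeL (s :: t :: rest) 0 = (s ++ t) :: rest := by
  simp [mergeL]

theorem length_mergeL (l : List String) (j : Nat) (h : j + 1 < l.length) :
    (mergeL l j).length = l.length - 1 := by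
  simp [mergeL]; omega

theorem pyArgmin_bound (l : List String) (h : l ≠ []) :
    0 ≤ pyArgmin l ∧ pyArgmin l < (l.length : Int) := by
  unfold pyArgmin
  have hne : PySem.List.pyRange 0 (PySem.List.len l) 1 ≠ [] := by
    intro hempty
    have h0 : (0 : Int) ∈ PySem.List.pyRange 0 (PySem.List.len l) 1 := by
      refine PySem.List.mem_pyRange_one.mpr ⟨by omega, ?_⟩
      simp [PySem.List.len_eq]
      exact Nat.pos_of_ne_zero (by simpa [List.length_eq_zero_iff] using h)
    rw [hempty] at h0; simp at h0
  have hv' : (PySem.List.min? (PySem.List.pyRange 0 (PySem.List.len l) 1)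
      (fun i => PySem.Str.len (PySem.List.pyGetD l i ""))).isSome := by
    rw [Option.isSome_iff_ne_none]; intro hn
    rw [PySem.List.min?_eq_none_iff] at hn; exact hne hn
  obtain ⟨v, hv⟩ := Option.isSome_iff_exists.mp hv'
  have hmem := PySem.List.min?_mem hv
  rw [PySem.List.mem_pyRange_one] at hmem
  rw [hv]
  simpa [PySem.List.len_eq] using hmem

theorem idxA_lt (l : List String) (h : 2 ≤ l.length) : idxA l < l.length := by
  cases hfi : l.findIdx? shortB with
  | some i =>
    have h1 : idxA l = i := by unfold idxA; rw [hfi]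
    have := List.findIdx?_eq_some_iff_findIdx_eq.mp hfi
    omega
  | none =>
    have h1 : idxA l = (pyArgmin l).toNat := by unfold idxA; rw [hfi]
    have hb := pyArgmin_bound l (by intro hnil; subst hnil; simp at h)
    omega

theorem stepA_length (l : List String) (hl : 2 ≤ l.length) :
    (stepA l).length = l.length - 1 := by
  unfold stepA
  have hi := idxA_lt l hl
  apply length_mergeL
  by_cases h0 : idxA l = 0
  · simp [h0]; omega
  · simp [h0]; omega

theorem set_eraseIdx : ∀ (l : List String) (k : Nat) (x : String), k + 1 < l.length →
    (l.set k x).eraseIdx (k+1) = l.take k ++ x :: l.drop (k+2) := by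
  intro l k
  induction k generalizing l with
  | zero =>
    intro x h
    match l, h with
    | a :: b :: t, _ => simp
  | succ k ih =>
    intro x h
    match l, h with
    | a :: t, h =>
      have ht : k + 1 < t.length := by simp at h; omega
      simp only [List.set_cons_succ, List.eraseIdx_cons_succ, List.take_succ_cons,
        List.drop_succ_cons, List.cons_append]
      rw [ih t x ht]

theorem refA_P (m : Nat) (l : List String) : refA m l = refA (P m l).1 (P m l).2 := by
  induction m generalizing l with
  | zero => rfl
  | succ m ih =>
    rw [P]
    split
    · exact ih (stepA l)
    · rfl

theorem P_stop (m : Nat) (l : List String)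
    (h : m = 0 ∨ (∀ s ∈ l, shortB s = false) ∨ l.length ≤ 1) : P m l = (m, l) := by
  cases m with
  | zero => rfl
  | succ m =>
    rw [P]
    rw [if_neg]
    rintro ⟨h1, h2⟩
    rcases h with h | h | h
    · omega
    · rw [List.findIdx?_eq_none_iff.mpr h] at h1; simp at h1
    · omega

theorem P_post (m : Nat) (l : List String) :
    (P m l).1 = 0 ∨ ((P m l).2.findIdx? shortB = none ∨ (P m l).2.length ≤ 1) := by
  induction m generalizing l with
  | zero => left; rfl
  | succ m ih =>
    rw [P]
    split
    · exact ih (stepA l)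
    · rename_i h
      rw [Decidable.not_and_iff_not_or_not] at h
      rcases h with h | h
      · right; left; simpa [Option.isSome_iff_ne_none] using h
      · right; right; show l.length ≤ 1; omega

theorem P_len (m : Nat) (l : List String) (h : m = 0 ∨ m + 1 ≤ l.length) :
    (P m l).1 = 0 ∨ (P m l).1 + 1 ≤ (P m l).2.length := by
  induction m generalizing l with
  | zero => left; rfl
  | succ m ih =>
    rw [P]
    split
    · rename_i hc
      apply ih
      rw [stepA_length l hc.2]
      omega
    · rename_i h2
      right
      show m + 1 + 1 ≤ l.length
      omega

theorem head_filt_enum : ∀ (l : List String) (s : Int),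
    (((PySem.List.enumerate l s).filter (fun p => decide (PySem.Str.len p.2 < 3))).head?).map (fun p => p.1)
      = Option.map (fun i : Nat => s + (i : Int)) (l.findIdx? shortB) := by
  intro l
  induction l with
  | nil => intro s; simp [PySem.List.enumerate_nil]
  | cons x t ih =>
    intro s
    rw [PySem.List.enumerate_cons, List.findIdx?_cons, List.filter_cons]
    have hpred : (decide (PySem.Str.len ((s, x) : Int × String).2 < 3)) = shortB x := rfl
    rw [hpred]
    cases hx : shortB x
    · rw [if_neg (by simp : ¬ (false = true)), if_neg (by simp : ¬ (false = true))]
      rw [ih (s+1)]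
      cases t.findIdx? shortB <;> (simp; try ring)
    · simp
theorem pop_body (l : List String) (n : Nat) (hn : n < l.length) (hl : 2 ≤ l.length) :
    PySem.List.pop?
      (if ((n:Int)) < (if (n:Int) = 0 then 1 else if (n:Int) = PySem.List.len l - 1 then (n:Int) - 1 else (n:Int) - 1) then
        PySem.List.pySetD l (if (n:Int) = 0 then 1 else if (n:Int) = PySem.List.len l - 1 then (n:Int) - 1 else (n:Int) - 1)
          (PySem.List.pyGetD l (n:Int) "" ++ PySem.List.pyGetD l (if (n:Int) = 0 then 1 else if (n:Int) = PySem.List.len l - 1 then (n:Int) - 1 else (n:Int) - 1) "")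
      else
        PySem.List.pySetD l (if (n:Int) = 0 then 1 else if (n:Int) = PySem.List.len l - 1 then (n:Int) - 1 else (n:Int) - 1)
          (PySem.List.pyGetD l (if (n:Int) = 0 then 1 else if (n:Int) = PySem.List.len l - 1 then (n:Int) - 1 else (n:Int) - 1) "" ++ PySem.List.pyGetD l (n:Int) ""))
      (n:Int)
    = some (l.getD n "", mergeL l (if n = 0 then 0 else n - 1)) := by
  have hT : (if (n:Int) = 0 then (1:Int) else if (n:Int) = PySem.List.len l - 1 then (n:Int) - 1 else (n:Int) - 1)
      = (if (n:Int) = 0 then (1:Int) else (n:Int) - 1) := by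
    simp
  rw [hT]
  cases n with
  | zero =>
    match l, hl with
    | a :: b :: t, _ =>
      have hc0 : ((0:Nat):Int) = 0 := by norm_num
      rw [hc0, if_pos rfl, if_pos (by norm_num : (0:Int) < 1)]
      rw [PySem.List.pyGetD_zero_cons, PySem.List.pyGetD_ofNat' (a::b::t) 1,
        PySem.List.pySetD_of_nonneg _ _ (by omega)]
      simp [PySem.List.pop?_zero_cons, mergeL_zero_cons]
  | succ k =>
    have h0 : ((k+1 : Nat) : Int) ≠ 0 := by push_cast; omega
    rw [if_neg h0, if_neg (by push_cast; omega : ¬ (((k+1:Nat):Int) < ((k+1:Nat):Int) - 1))]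
    have hk : ((k+1 : Nat) : Int) - 1 = ((k : Nat) : Int) := by push_cast; ring
    rw [hk]
    rw [PySem.List.pySetD_natCast, PySem.List.pyGetD_natCast, PySem.List.pyGetD_natCast]
    have hlen : k + 1 < (l.set k (l.getD k "" ++ l.getD (k+1) "")).length := by
      simpa using hn
    rw [PySem.List.pop?_natCast _ _ hlen]
    congr 1
    refine Prod.ext ?_ ?_
    · show (l.set k _)[k+1]'hlen = l.getD (k+1) ""
      simp [hn]
    · show (l.set k _).eraseIdx (k+1) = mergeL l (if k + 1 = 0 then 0 else k + 1 - 1)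
      rw [set_eraseIdx l k _ hn]
      simp [mergeL]

theorem bodyA_eq (l : List String) (mx : Int) (hl : 2 ≤ l.length)
    (hmx : PySem.List.len l > mx) (fuel : Nat) :
    mergeLoopA (fuel+1) l mx = mergeLoopA fuel (stepA l) mx := by
  simp only [mergeLoopA]
  rw [if_pos hmx]
  -- resolve the filtered enumeration against findIdx?
  have hmain := head_filt_enum l 0
  have hidx : idxA l < l.length := idxA_lt l hl
  cases hfi : l.findIdx? shortB with
  | some i =>
    rw [hfi] at hmain
    rw [Option.map_some] at hmain
    obtain ⟨p, hp, hp1⟩ := Option.map_eq_some_iff.mp hmain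
    obtain ⟨tl, htl⟩ := List.head?_eq_some_iff.mp hp
    have hidxa : idxA l = i := by unfold idxA; rw [hfi]
    rw [htl]
    have hmatch : (match p :: tl with | q :: _ => q.1 | [] => pyArgmin l) = p.1 := rfl
    rw [hmatch]
    have hp1' : p.1 = ((i : Nat) : Int) := by rw [hp1]; ring
    rw [hp1']
    rw [pop_body l i (by omega) hl]
    have hstep : stepA l = mergeL l (if i = 0 then 0 else i - 1) := by
      unfold stepA; rw [hidxa]
    rw [hstep]
  | none =>
    rw [hfi] at hmain
    rw [Option.map_none, Option.map_eq_none_iff, List.head?_eq_none_iff] at hmain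
    rw [hmain]
    have hmatch : (match ([] : List (Int × String)) with | q :: _ => q.1 | [] => pyArgmin l) = pyArgmin l := rfl
    rw [hmatch]
    have hidxa : idxA l = (pyArgmin l).toNat := by unfold idxA; rw [hfi]
    have hb := pyArgmin_bound l (by intro hnil; subst hnil; simp at hl)
    have hcast : pyArgmin l = (((pyArgmin l).toNat : Nat) : Int) := by omega
    rw [hcast]
    rw [pop_body l (pyArgmin l).toNat (by omega) hl]
    have hstep : stepA l = mergeL l (if (pyArgmin l).toNat = 0 then 0 else (pyArgmin l).toNat - 1) := by
      unfold stepA; rw [hidxa]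
    rw [hstep]

theorem loopA_eq (mx : Int) (hmx : 1 ≤ mx) :
    ∀ (fuel : Nat) (l : List String), ((l.length : Int) - mx).toNat ≤ fuel →
    mergeLoopA fuel l mx = refA ((l.length : Int) - mx).toNat l := by
  intro fuel
  induction fuel with
  | zero =>
    intro l h
    have h0 : ((l.length : Int) - mx).toNat = 0 := by omega
    rw [h0]; rfl
  | succ fuel ih =>
    intro l h
    by_cases hgt : PySem.List.len l > mx
    · have hgt' : mx < (l.length : Int) := by simpa [PySem.List.len_eq] using hgt
      have hl2 : 2 ≤ l.length := by omega
      rw [bodyA_eq l mx hl2 hgt fuel]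
      have hlen' : (stepA l).length = l.length - 1 := stepA_length l hl2
      rw [ih (stepA l) (by rw [hlen']; omega)]
      have hsplit : ((l.length : Int) - mx).toNat = (((stepA l).length : Int) - mx).toNat + 1 := by
        rw [hlen']; omega
      rw [hsplit, refA]
    · rw [mergeLoopA, if_neg hgt]
      have hle : (l.length : Int) ≤ mx := by simpa [PySem.List.len_eq] using hgt
      have h0 : ((l.length : Int) - mx).toNat = 0 := by omega
      rw [h0]; rfl

theorem shortB_append_false (a b : String) (ha : shortB a = false) :
    shortB (a ++ b) = false := by
  have hb : 0 ≤ PySem.Str.len b := by rw [PySem.Str.len_eq]; positivity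
  have ha' : ¬ PySem.Str.len a < 3 := by simpa [shortB] using ha
  have h3 : ¬ PySem.Str.len (a ++ b) < 3 := by rw [PySem.Str.len_append]; omega
  simpa [shortB] using h3

theorem mergeL_no_short (l : List String) (j : Nat) (hj : j + 1 < l.length)
    (hs : ∀ s ∈ l, shortB s = false) : ∀ s ∈ mergeL l j, shortB s = false := by
  intro s hsm
  unfold mergeL at hsm
  rcases List.mem_append.mp hsm with h | h
  · exact hs s (List.mem_of_mem_take h)
  · rcases List.mem_cons.mp h with h | h
    · subst h
      apply shortB_append_false
      apply hs
      rw [List.getD_eq_getElem l "" (by omega)]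
      exact List.getElem_mem _
    · exact hs s (List.mem_of_mem_drop h)

theorem phase2_eq (m : Nat) (l : List String)
    (hs : ∀ s ∈ l, shortB s = false) (hm : m = 0 ∨ m + 1 ≤ l.length) :
    refA m l = phase2B m l := by
  induction m generalizing l with
  | zero => rfl
  | succ m ih =>
    have hl2 : 2 ≤ l.length := by omega
    have hfi : l.findIdx? shortB = none := List.findIdx?_eq_none_iff.mpr (by
      intro x hx; simp [hs x hx])
    have hb := pyArgmin_bound l (by intro h; subst h; simp at hl2)
    have hidxa : idxA l = (pyArgmin l).toNat := by unfold idxA; rw [hfi]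
    set n : Nat := (pyArgmin l).toNat with hn
    have hcast : pyArgmin l = (n : Int) := by omega
    have hnlt : n < l.length := by omega
    set jj : Nat := if n = 0 then 0 else n - 1 with hjj
    have hjlt : jj + 1 < l.length := by
      by_cases h0 : n = 0
      · simp [hjj, h0]; omega
      · simp [hjj, h0]; omega
    have hstep : stepA l = mergeL l jj := by unfold stepA; rw [hidxa]
    have hJ : (if pyArgmin l = 0 then (1:Int) else pyArgmin l) = ((jj + 1 : Nat) : Int) := by
      rw [hcast]
      by_cases h0 : n = 0
      · simp [hjj, h0]
      · rw [if_neg (by omega), hjj, if_neg h0]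
        push_cast; omega
    have hphase : phase2B (m+1) l = phase2B m (mergeL l jj) := by
      rw [phase2B]
      congr 1
      rw [hJ]
      have e1 : ((jj + 1 : Nat) : Int) - 1 = ((jj : Nat) : Int) := by push_cast; ring
      have e2 : ((jj + 1 : Nat) : Int) + 1 = ((jj + 2 : Nat) : Int) := by push_cast; ring
      rw [e1, e2]
      rw [PySem.List.slice_to l (by positivity), PySem.List.slice_from l (by positivity)]
      rw [PySem.List.pyGetD_natCast, PySem.List.pyGetD_natCast]
      unfold mergeL
      congr 1
    rw [hphase]
    rw [show refA (m+1) l = refA m (stepA l) from rfl, hstep]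
    apply ih
    · exact mergeL_no_short l jj hjlt hs
    · rw [length_mergeL l jj hjlt]; omega

theorem stepA_cons_short (s t : String) (rest : List String) (hs : shortB s = true) :
    stepA (s :: t :: rest) = (s ++ t) :: rest := by
  have hfi : (s :: t :: rest).findIdx? shortB = some 0 := by
    rw [List.findIdx?_cons, if_pos (by simp [hs])]
  have hidxa : idxA (s :: t :: rest) = 0 := by unfold idxA; rw [hfi]
  unfold stepA
  rw [hidxa]
  simp [mergeL_zero_cons]

theorem stepA_mid (q : List String) (s t : String) (rest : List String)
    (hq : ∀ x ∈ q, shortB x = false) (hs : shortB s = false) (ht : shortB t = true) :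
    stepA (q ++ s :: t :: rest) = q ++ (s ++ t) :: rest := by
  have hfi : (q ++ s :: t :: rest).findIdx? shortB = some (q.length + 1) := by
    rw [List.findIdx?_append, List.findIdx?_eq_none_iff.mpr (by intro x hx; simp [hq x hx]),
      List.findIdx?_cons, if_neg (by simp [hs]), List.findIdx?_cons, if_pos (by simp [ht])]
    simp [Nat.add_comm]
  have hidxa : idxA (q ++ s :: t :: rest) = q.length + 1 := by unfold idxA; rw [hfi]
  unfold stepA
  rw [hidxa]
  rw [if_neg (Nat.succ_ne_zero _)]
  have h1 : q.length + 1 - 1 = q.length + 0 := by omega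
  rw [h1, mergeL_append q (s :: t :: rest) 0, mergeL_zero_cons]

-- the stack invariant after an inner reduce: nothing short left (or fuel/stack exhausted)
def PostInv (m : Nat) (st : List String) : Prop :=
  m = 0 ∨ (∀ s ∈ st, shortB s = false) ∨ st.length ≤ 1

theorem findIdx?_isSome_of_mem {l : List String} {p : String → Bool} {x : String}
    (hx : x ∈ l) (hp : p x = true) : (l.findIdx? p).isSome := by
  rw [Option.isSome_iff_ne_none]
  intro hn
  rw [List.findIdx?_eq_none_iff] at hn
  exact absurd hp (by simp [hn x hx])

-- elements of r (below the top two of the stack) are never short under the stack invariant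
theorem preInv_tail (t s : String) (r : List String)
    (h : ∀ (i : Nat) (hi : i < (t :: s :: r).length), shortB (t :: s :: r)[i] = true →
      i = 0 ∨ (i = (t :: s :: r).length - 1 ∧ (t :: s :: r).length ≤ 2)) :
    ∀ x ∈ r, shortB x = false := by
  intro x hx
  obtain ⟨i, hi, hxi⟩ := List.mem_iff_getElem.mp hx
  by_contra hsh
  have hi2 : i + 2 < (t :: s :: r).length := by simp; omega
  have hsh' : shortB ((t :: s :: r)[i+2]'hi2) = true := by
    have hget : (t :: s :: r)[i+2]'hi2 = x := by simpa using hxi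
    rw [hget]; simpa using hsh
  rcases h (i+2) hi2 hsh' with h0 | ⟨h1, h2⟩
  · omega
  · have hr0 : r = [] := by simpa using h2
    subst hr0; simp at hi

theorem preInv_snd (t s : String) (r : List String) (hr : r ≠ [])
    (h : ∀ (i : Nat) (hi : i < (t :: s :: r).length), shortB (t :: s :: r)[i] = true →
      i = 0 ∨ (i = (t :: s :: r).length - 1 ∧ (t :: s :: r).length ≤ 2)) :
    shortB s = false := by
  by_contra hsh
  have hi2 : 1 < (t :: s :: r).length := by simp
  have hsh' : shortB ((t :: s :: r)[1]'hi2) = true := by simpa using hsh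
  rcases h 1 hi2 hsh' with h0 | ⟨h1, h2⟩
  · omega
  · exact hr (by simpa using h2)

theorem preInv_merged (s t : String) (r : List String) (hr : ∀ x ∈ r, shortB x = false) :
    ∀ (i : Nat) (hi : i < ((s ++ t) :: r).length), shortB ((s ++ t) :: r)[i] = true →
      i = 0 ∨ (i = ((s ++ t) :: r).length - 1 ∧ ((s ++ t) :: r).length ≤ 2) := by
  intro i hi hsh
  cases i with
  | zero => left; rfl
  | succ j =>
    exfalso
    have hj : j < r.length := by simpa using hi
    have hsh' : shortB (r[j]'hj) = true := by simpa using hsh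
    rw [hr (r[j]'hj) (List.getElem_mem hj)] at hsh'
    exact absurd hsh' (by simp)

theorem reduce_spec (m : Nat) (stack : List String)
    (h : ∀ (i : Nat) (hi : i < stack.length), shortB stack[i] = true →
      i = 0 ∨ (i = stack.length - 1 ∧ stack.length ≤ 2)) (rest : List String) :
    P m (stack.reverse ++ rest) =
      P (reduceB m stack).1 ((reduceB m stack).2.reverse ++ rest) := by
  induction m generalizing stack with
  | zero => rfl
  | succ m ih =>
    match stack, h with
    | [], h => rfl
    | [t], h => rfl
    | t :: s :: r, h =>
      rw [reduceB]
      split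
      · rename_i hc
        -- the merge performed by the stack is A's merge of the first short segment
        have hrw : (t :: s :: r).reverse ++ rest = r.reverse ++ s :: t :: rest := by
          simp
        have hrw2 : ((s ++ t) :: r).reverse ++ rest = r.reverse ++ (s ++ t) :: rest := by
          simp
        have hcond : shortB t = true ∨ (r = [] ∧ shortB s = true) := by
          simpa [shortB, Bool.or_eq_true, Bool.and_eq_true, decide_eq_true_eq] using hc
        have hstep : stepA (r.reverse ++ s :: t :: rest) = r.reverse ++ (s ++ t) :: rest := by
          by_cases hrs : r = [] ∧ shortB s = true
          · obtain ⟨hr0, hs1⟩ := hrs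
            subst hr0
            simpa using stepA_cons_short s t rest hs1
          · have ht : shortB t = true := by tauto
            have hs0 : shortB s = false := by
              by_cases hr0 : r = []
              · rcases Bool.eq_false_or_eq_true (shortB s) with h' | h'
                · exact absurd ⟨hr0, h'⟩ hrs
                · exact h'
              · exact preInv_snd t s r hr0 h
            have hq : ∀ x ∈ r.reverse, shortB x = false := by
              intro x hx
              exact preInv_tail t s r h x (List.mem_reverse.mp hx)
            exact stepA_mid r.reverse s t rest hq hs0 ht
        have hsome : ((r.reverse ++ s :: t :: rest).findIdx? shortB).isSome := by
          rcases hcond with ht | ⟨hr0, hs1⟩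
          · exact findIdx?_isSome_of_mem (by simp) ht
          · exact findIdx?_isSome_of_mem (l := r.reverse ++ s :: t :: rest) (by simp) hs1
        rw [hrw]
        rw [show P (m+1) (r.reverse ++ s :: t :: rest)
            = P m (stepA (r.reverse ++ s :: t :: rest)) by
          rw [P, if_pos ⟨hsome, by simp; omega⟩]]
        rw [hstep, ← hrw2]
        exact ih ((s ++ t) :: r) (preInv_merged s t r (preInv_tail t s r h))
      · rfl

theorem reduce_post (m : Nat) (stack : List String)
    (h : ∀ (i : Nat) (hi : i < stack.length), shortB stack[i] = true →
      i = 0 ∨ (i = stack.length - 1 ∧ stack.length ≤ 2)) :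
    PostInv (reduceB m stack).1 (reduceB m stack).2 := by
  induction m generalizing stack with
  | zero => left; rfl
  | succ m ih =>
    match stack, h with
    | [], h => right; right; simp [reduceB]
    | [t], h => right; right; simp [reduceB]
    | t :: s :: r, h =>
      rw [reduceB]
      split
      · exact ih ((s ++ t) :: r) (preInv_merged s t r (preInv_tail t s r h))
      · rename_i hc
        simp only [Bool.or_eq_true, Bool.and_eq_true, decide_eq_true_eq, not_or, not_and] at hc
        obtain ⟨hct, hcs⟩ := hc
        right; left
        intro x hx
        rcases List.mem_cons.mp hx with h1 | hx
        · rw [h1]; simpa [shortB] using hct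
        rcases List.mem_cons.mp hx with h1 | hx
        · rw [h1]
          by_cases hr0 : r = []
          · simpa [shortB] using hcs hr0
          · exact preInv_snd t s r hr0 h
        · exact preInv_tail t s r h x hx

theorem postInv_push (m : Nat) (x : String) (stack : List String) (hpost : PostInv m stack) (hm : m ≠ 0) :
    ∀ (i : Nat) (hi : i < (x :: stack).length), shortB (x :: stack)[i] = true →
      i = 0 ∨ (i = (x :: stack).length - 1 ∧ (x :: stack).length ≤ 2) := by
  intro i hi hsh
  cases i with
  | zero => left; rfl
  | succ j =>
    rcases hpost with h0 | hns | hlen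
    · exact absurd h0 hm
    · exfalso
      have hj : j < stack.length := by simpa using hi
      have : shortB (stack[j]'hj) = true := by simpa using hsh
      rw [hns (stack[j]'hj) (List.getElem_mem hj)] at this
      exact absurd this (by simp)
    · right
      have hsl : (x :: stack).length = stack.length + 1 := by simp
      have hj : j < stack.length := by simpa using hi
      constructor <;> omega

theorem foldl_P (rest : List String) : ∀ (m : Nat) (stack : List String), PostInv m stack →
    P m (stack.reverse ++ rest) =
      P (rest.foldl (fun (st : Nat × List String) seg => reduceB st.1 (seg :: st.2)) (m, stack)).1
        ((rest.foldl (fun (st : Nat × List String) seg => reduceB st.1 (seg :: st.2)) (m, stack)).2.reverse) := by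
  induction rest with
  | nil =>
    intro m stack h
    simp
  | cons x rest ih =>
    intro m stack hpost
    rw [List.foldl_cons]
    have hrw : stack.reverse ++ x :: rest = (x :: stack).reverse ++ rest := by simp
    cases m with
    | zero =>
      rw [hrw]
      have h0 : reduceB 0 (x :: stack) = (0, x :: stack) := rfl
      rw [h0]
      exact ih 0 (x :: stack) (Or.inl rfl)
    | succ m' =>
      have hpre := postInv_push (m'+1) x stack hpost (by omega)
      rw [hrw, reduce_spec (m'+1) (x :: stack) hpre rest]
      exact ih _ _ (reduce_post (m'+1) (x :: stack) hpre)

theorem foldl_P_post (rest : List String) : ∀ (m : Nat) (stack : List String), PostInv m stack →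
    PostInv (rest.foldl (fun (st : Nat × List String) seg => reduceB st.1 (seg :: st.2)) (m, stack)).1
      (rest.foldl (fun (st : Nat × List String) seg => reduceB st.1 (seg :: st.2)) (m, stack)).2 := by
  induction rest with
  | nil => intro m stack h; exact h
  | cons x rest ih =>
    intro m stack hpost
    rw [List.foldl_cons]
    cases m with
    | zero =>
      have h0 : reduceB 0 (x :: stack) = (0, x :: stack) := rfl
      rw [h0]
      exact ih 0 (x :: stack) (Or.inl rfl)
    | succ m' =>
      have hpre := postInv_push (m'+1) x stack hpost (by omega)
      exact ih _ _ (reduce_post (m'+1) (x :: stack) hpre)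

-- ===== VERDICT (by name: the statement is the Claim_ definition above) =====
theorem merge_segments_spec : Claim_equal_merge_segments := by
  unfold Claim_equal_merge_segments Spec_merge_segments
  intro segs mx hdom hpre
  unfold merge_segments merge_segments_alt
  by_cases hle : PySem.List.len segs ≤ mx
  · rw [if_pos hle, if_pos (by simp [PySem.List.len_eq] at hle ⊢; omega : PySem.List.len segs - mx ≤ 0)]
  · have hlt : mx < (segs.length : Int) := by
      simp [PySem.List.len_eq] at hle; omega
    have hmx1 : 1 ≤ mx := by
      rcases hpre with h | h
      · exact h
      · omega
    rw [if_neg hle, if_neg (by simp [PySem.List.len_eq]; omega : ¬ PySem.List.len segs - mx ≤ 0)]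
    have hkk : ((segs.length : Int) - mx).toNat = (PySem.List.len segs - mx).toNat := by
      simp [PySem.List.len_eq]
    have hklen : ((segs.length : Int) - mx).toNat ≤ segs.length := by omega
    rw [loopA_eq mx hmx1 segs.length segs hklen, hkk]
    set k : Nat := (PySem.List.len segs - mx).toNat with hk
    have hk1 : k + 1 ≤ segs.length := by rw [hk]; simp [PySem.List.len_eq]; omega
    have hemp : PostInv k ([] : List String) := Or.inr (Or.inl (by intro s hs; cases hs))
    have hfold := foldl_P segs k [] hemp
    simp only [List.reverse_nil, List.nil_append] at hfold
    have hpost := foldl_P_post segs k [] hemp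
    set pr := segs.foldl (fun (st : Nat × List String) seg => reduceB st.1 (seg :: st.2))
      (k, ([] : List String)) with hpr
    have hstop : P pr.1 pr.2.reverse = (pr.1, pr.2.reverse) := by
      apply P_stop
      rcases hpost with h0 | hns | hl1
      · exact Or.inl h0
      · exact Or.inr (Or.inl (fun s hs => hns s (List.mem_reverse.mp hs)))
      · exact Or.inr (Or.inr (by simpa using hl1))
    have hPk : P k segs = (pr.1, pr.2.reverse) := hfold.trans hstop
    rw [refA_P k segs, hPk]
    show refA pr.1 pr.2.reverse = phase2B pr.1 pr.2.reverse
    have hpl := P_len k segs (Or.inr hk1)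
    rw [hPk] at hpl
    rcases Nat.eq_zero_or_pos pr.1 with h0 | hpos
    · rw [h0]; rfl
    · apply phase2_eq
      · have hpp := P_post k segs
        rw [hPk] at hpp
        rcases hpp with h0 | hnone | hl1
        · omega
        · exact List.findIdx?_eq_none_iff.mp hnone
        · exfalso
          rcases hpl with h0 | h2
          · omega
          · omega
      · exact hpl
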